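-- pv_equiv track=rewrite | github.com/KotorinChunChun/ChulipVideo | overlay_utils.py | get_input_display_text
-- ===== SOURCE A (Python) =====
-- def get_input_display_text(click: str, keys: str) -> str:
--     """マウスのクリックとキー入力文字列から、表示用のテキストを生成する。"""
--     modifiers_found = []
--     mouse_found = []
--     other_keys_found = []
--     modifier_order = ["Ctrl", "Shift", "Alt", "Win"]
--
--     if keys and keys != "None":
--         k_list = [k.strip() for k in keys.split(",") if k.strip()]
--         for k in k_list:
--             if k in modifier_order:
--                 modifiers_found.append(k)
--             else:
--                 # 1文字の英字キーは大文字に固定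
--                 if len(k) == 1 and k.isalpha():
--                     k = k.upper()
--                 other_keys_found.append(k)
--     # 修飾キーを規定の順序でソートし、重複を排除
--     modifiers_found = sorted(list(set(modifiers_found)), key=lambda x: modifier_order.index(x) if x in modifier_order else 99)
--
--     if click and click != "None":
--         if "L" in click: mouse_found.append("左クリック")
--         if "R" in click: mouse_found.append("右クリック")
--         if "M" in click: mouse_found.append("中クリック")
--
--     combined_parts = modifiers_found + mouse_found + other_keys_found
--
--     # 修飾キーのみの場合は表示しない（何か具体的操作が含まれる場合のみ表示）
--     has_non_modifier = (len(mouse_found) > 0) or (len(other_keys_found) > 0)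
--     if combined_parts and has_non_modifier:
--         return " + ".join(combined_parts)
--     return ""
-- ===== SOURCE B (Python) =====
-- _MOD_TABLE = (("Ctrl", 1), ("Shift", 2), ("Alt", 4), ("Win", 8))
--
--
-- def _scan(tokens):
--     """Fold the token list right-to-left into (modifier bitmask, other keys)."""
--     mask, others = 0, []
--     for t in reversed(tokens):
--         k = t.strip()
--         if not k:
--             continue
--         for name, bit in _MOD_TABLE:
--             if k == name:
--                 mask |= bit
--                 break
--         else:
--             if len(k) == 1 and k.isalpha():
--                 k = k.upper()
--             others = [k] + others
--     return mask, others
--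
--
-- def _decode(mask, table):
--     """Turn the bitmask back into modifier names in canonical priority order."""
--     if not table:
--         return []
--     name, bit = table[0]
--     rest = _decode(mask, table[1:])
--     return ([name] + rest) if mask & bit else rest
--
--
-- def get_input_display_text(click: str, keys: str) -> str:
--     """マウスのクリックとキー入力文字列から、表示用のテキストを生成する。"""
--     mask, others = _scan(keys.split(",")) if keys and keys != "None" else (0, [])
--     mouse = []
--     if click and click != "None":
--         if "L" in click: mouse.append("左クリック")
--         if "R" in click: mouse.append("右クリック")
--         if "M" in click: mouse.append("中クリック")
--     if not mouse and not others:
--         return ""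
--     return " + ".join(_decode(mask, list(_MOD_TABLE)) + mouse + others)
-- ===== Notes on version B (the rewrite author's own statement) =====
-- stated objective: alternative
-- what changed: B replaces A's classify-into-lists / set() / sorted(key=modifier_order.index) pipeline by a single structural recursion over the token list that accumulates a modifier bitmask (bitwise OR deduplicates) and conses the other keys back-to-front, then decodes the bitmask recursively into the canonical modifier order.
import Mathlib
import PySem

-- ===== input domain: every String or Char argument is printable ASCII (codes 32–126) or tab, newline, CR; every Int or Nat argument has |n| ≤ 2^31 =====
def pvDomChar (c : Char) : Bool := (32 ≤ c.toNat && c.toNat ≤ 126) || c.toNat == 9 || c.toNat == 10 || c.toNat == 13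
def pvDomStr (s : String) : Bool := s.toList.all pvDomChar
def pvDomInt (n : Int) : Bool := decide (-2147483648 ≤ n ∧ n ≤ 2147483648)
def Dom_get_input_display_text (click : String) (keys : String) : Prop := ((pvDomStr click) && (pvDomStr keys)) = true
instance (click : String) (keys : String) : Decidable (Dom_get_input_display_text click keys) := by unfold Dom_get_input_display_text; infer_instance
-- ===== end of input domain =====

-- B replaces A's classify/set()/sorted(key=index) pipeline by one structural right-to-left pass over the
-- token list that accumulates a modifier BITMASK (OR dedups) plus the other keys consed back-to-front,
-- then decodes the bitmask recursively into the canonical order; return value proved equal (alternative, not faster).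

def pvModifierOrder : List String := ["Ctrl", "Shift", "Alt", "Win"]

-- ===== PORT A =====
-- loop body of A's 'for k in k_list'
def pvAStep (st : List String × List String) (k : String) : List String × List String :=
  if pvModifierOrder.contains k then (st.1 ++ [k], st.2)
  else
    let k := if PySem.Str.len k == 1 && PySem.Str.strIsalpha k then PySem.Str.upper k else k
    (st.1, st.2 ++ [k])

-- key=lambda x: modifier_order.index(x) if x in modifier_order else 99
def pvAKey (x : String) : Int :=
  if pvModifierOrder.contains x then (((PySem.List.index? pvModifierOrder x).getD 99 : Nat) : Int) else 99

def get_input_display_text (click : String) (keys : String) : String :=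
  let st :=
    if keys ≠ "" ∧ keys ≠ "None" then
      let k_list := (((PySem.Str.split? keys ",").getD []).filter
          (fun k => PySem.Str.strip k ≠ "")).map PySem.Str.strip
      k_list.foldl pvAStep (([] : List String), ([] : List String))
    else ([], [])
  let modifiers_found := PySem.List.sorted (PySem.Set.ofList st.1) pvAKey
  let mouse_found : List String :=
    if click ≠ "" ∧ click ≠ "None" then
      (if PySem.Str.isIn "L" click then ["左クリック"] else []) ++
      (if PySem.Str.isIn "R" click then ["右クリック"] else []) ++
      (if PySem.Str.isIn "M" click then ["中クリック"] else [])
    else []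
  let combined_parts := modifiers_found ++ mouse_found ++ st.2
  let has_non_modifier := mouse_found.length > 0 ∨ st.2.length > 0
  if combined_parts ≠ [] ∧ has_non_modifier then PySem.Str.join " + " combined_parts else ""

-- ===== PORT B =====
def pvModTable : List (String × Nat) := [("Ctrl", 1), ("Shift", 2), ("Alt", 4), ("Win", 8)]

-- Source B's 'for name, bit in _MOD_TABLE: if k == name: return mask | bit, others' linear search
def pvFindBit (k : String) : List (String × Nat) → Option Nat
  | [] => none
  | (name, bit) :: rest => if k = name then some bit else pvFindBit k rest

-- Source B's _scan loop body ('for t in reversed(tokens)')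
def pvBStep (st : Nat × List String) (t : String) : Nat × List String :=
  let k := PySem.Str.strip t
  if k = "" then st
  else
    match pvFindBit k pvModTable with
    | some bit => (st.1 ||| bit, st.2)
    | none =>
      let k := if PySem.Str.len k == 1 && PySem.Str.strIsalpha k then PySem.Str.upper k else k
      (st.1, k :: st.2)

-- Source B's _scan: right-to-left pass producing (modifier bitmask, other keys)
def pvScan (tokens : List String) : Nat × List String :=
  tokens.reverse.foldl pvBStep (0, [])

-- Source B's _decode: recursion over the table, keeping names whose bit is set
def pvDecode (mask : Nat) : List (String × Nat) → List String
  | [] => []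
  | (name, bit) :: rest =>
    let r := pvDecode mask rest
    if mask &&& bit ≠ 0 then name :: r else r

def get_input_display_text_alt (click : String) (keys : String) : String :=
  let st :=
    if keys ≠ "" ∧ keys ≠ "None" then pvScan ((PySem.Str.split? keys ",").getD [])
    else (0, [])
  let mouse : List String :=
    if click ≠ "" ∧ click ≠ "None" then
      (if PySem.Str.isIn "L" click then ["左クリック"] else []) ++
      (if PySem.Str.isIn "R" click then ["右クリック"] else []) ++
      (if PySem.Str.isIn "M" click then ["中クリック"] else [])
    else []
  if mouse = [] ∧ st.2 = [] then ""
  else PySem.Str.join " + " (pvDecode st.1 pvModTable ++ mouse ++ st.2)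

-- ===== PRECONDITION & SPEC =====
def Spec_get_input_display_text (click : String) (keys : String) (out : String) : Prop := out = get_input_display_text_alt click keys
instance (click : String) (keys : String) (out : String) : Decidable (Spec_get_input_display_text click keys out) := by unfold Spec_get_input_display_text; infer_instance

-- ===== CLAIM (what is proved, stated in full; the proofs are below) =====
def Claim_equal_get_input_display_text : Prop := ∀ (click : String) (keys : String), Dom_get_input_display_text click keys → Spec_get_input_display_text click keys (get_input_display_text click keys)

-- ===== LEMMAS AND PROOFS =====

-- normalization A and B both apply to a non-modifier key
def pvNorm (k : String) : String :=
  if PySem.Str.len k == 1 && PySem.Str.strIsalpha k then PySem.Str.upper k else k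

-- the bitmask B's scan accumulates over the modifier occurrences, right to left
def pvMaskOf (mods : List String) : Nat :=
  mods.foldr (fun k m => m ||| (pvFindBit k pvModTable).getD 0) 0

theorem pvFindBit_none {k : String} (h : pvFindBit k pvModTable = none) :
    pvModifierOrder.contains k = false := by
  by_cases h1 : k = "Ctrl" <;> by_cases h2 : k = "Shift" <;> by_cases h3 : k = "Alt" <;>
    by_cases h4 : k = "Win" <;> simp [pvFindBit, pvModTable, pvModifierOrder, h1, h2, h3, h4] at h ⊢

theorem pvFindBit_some {k : String} {b : Nat} (h : pvFindBit k pvModTable = some b) :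
    pvModifierOrder.contains k = true := by
  by_cases h1 : k = "Ctrl" <;> by_cases h2 : k = "Shift" <;> by_cases h3 : k = "Alt" <;>
    by_cases h4 : k = "Win" <;> simp [pvFindBit, pvModTable, pvModifierOrder, h1, h2, h3, h4] at h ⊢

theorem pvAStep_foldl (l : List String) (m o : List String) :
    l.foldl pvAStep (m, o) =
      (m ++ l.filter (fun k => pvModifierOrder.contains k),
       o ++ (l.filter (fun k => !pvModifierOrder.contains k)).map pvNorm) := by
  induction l generalizing m o with
  | nil => simp
  | cons k t ih =>
    by_cases h : k ∈ pvModifierOrder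
    · simp [pvAStep, h, ih]
    · by_cases h2 : (k.toList).length = 1 ∧ PySem.Chars.strIsalpha k.toList = true <;>
        simp [pvAStep, pvNorm, h, h2, ih]

theorem pvScan_eq (tokens : List String) :
    pvScan tokens =
      (pvMaskOf (((tokens.map PySem.Str.strip).filter (fun k => k ≠ "")).filter
          (fun k => pvModifierOrder.contains k)),
       ((((tokens.map PySem.Str.strip).filter (fun k => k ≠ "")).filter
          (fun k => !pvModifierOrder.contains k)).map pvNorm)) := by
  rw [pvScan, List.foldl_reverse]
  induction tokens with
  | nil => rfl
  | cons t rest ih =>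
    rw [List.foldr_cons, ih]
    by_cases h0 : PySem.Str.strip t = ""
    · simp [pvBStep, h0]
    · cases hf : pvFindBit (PySem.Str.strip t) pvModTable with
      | none =>
        have hc : PySem.Str.strip t ∉ pvModifierOrder := by simpa using pvFindBit_none hf
        by_cases h2 : ((PySem.Chars.strip t.toList).length = 1 ∧
            PySem.Chars.strIsalpha (PySem.Chars.strip t.toList) = true) <;>
          simp [pvBStep, pvNorm, h0, hf, hc, h2, List.filter_filter]
      | some b =>
        have hc : PySem.Str.strip t ∈ pvModifierOrder := by simpa using pvFindBit_some hf
        simp [pvBStep, h0, hc, pvMaskOf, hf, List.filter_filter]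

theorem pv_filter_map_strip (l : List String) :
    (l.filter (fun k => PySem.Str.strip k ≠ "")).map PySem.Str.strip
      = (l.map PySem.Str.strip).filter (fun k => k ≠ "") := by
  induction l with
  | nil => rfl
  | cons p t ih =>
    by_cases h : PySem.Str.strip p = "" <;> simp [h] <;> simpa using ih

theorem pv_sorted_eq_filter (mods : List String) (hsub : ∀ x ∈ mods, x ∈ pvModifierOrder) :
    PySem.List.sorted (PySem.Set.ofList mods) pvAKey =
      pvModifierOrder.filter (fun m => PySem.Set.contains (PySem.Set.ofList mods) m) := by
  apply PySem.List.sorted_eq_of_perm_of_pairwise_lt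
  · rw [List.perm_ext_iff_of_nodup (List.Nodup.filter _ (by decide)) (PySem.Set.nodup_ofList mods)]
    intro a
    simp only [List.mem_filter, PySem.Set.contains_iff, PySem.Set.mem_ofList]
    exact ⟨fun h => h.2, fun h => ⟨hsub a h, h⟩⟩
  · exact List.Pairwise.filter _ (by decide)

theorem pvOr_ne_zero (a b : Nat) : (a ||| b ≠ 0) ↔ (a ≠ 0 ∨ b ≠ 0) := by
  constructor
  · intro h
    by_contra hc
    simp only [not_or, not_not] at hc
    simp [hc.1, hc.2] at h
  · rintro (h | h) h0
    · exact h (Nat.le_zero.mp (h0 ▸ Nat.left_le_or))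
    · exact h (Nat.le_zero.mp (h0 ▸ Nat.right_le_or))

theorem pvMask_bit (name : String) (b : Nat) (hb : pvFindBit name pvModTable = some b)
    (mods : List String) (hsub : ∀ x ∈ mods, x ∈ pvModifierOrder) :
    (pvMaskOf mods &&& b ≠ 0) ↔ name ∈ mods := by
  have hname : name ∈ pvModifierOrder := by simpa using pvFindBit_some hb
  induction mods with
  | nil => simp [pvMaskOf]
  | cons k t ih =>
    have hk : k ∈ pvModifierOrder := hsub k (by simp)
    have ihx := ih (fun x hx => hsub x (by simp [hx]))
    have hmask : pvMaskOf (k :: t) = pvMaskOf t ||| (pvFindBit k pvModTable).getD 0 := rfl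
    simp only [pvModifierOrder, List.mem_cons, List.not_mem_nil, or_false] at hk hname
    rcases hname with h1 | h1 | h1 | h1 <;> subst h1 <;>
      simp [pvFindBit, pvModTable] at hb <;>
      subst hb <;>
      rcases hk with hk | hk | hk | hk <;> subst hk <;>
      simp [hmask, Nat.and_or_distrib_right, pvFindBit, pvModTable, pvOr_ne_zero, ihx] <;> simp_all

theorem pvDecode_eq (mods : List String) (hsub : ∀ x ∈ mods, x ∈ pvModifierOrder) :
    pvDecode (pvMaskOf mods) pvModTable =
      pvModifierOrder.filter (fun m => PySem.Set.contains (PySem.Set.ofList mods) m) := by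
  have h1 := pvMask_bit "Ctrl" 1 (by decide) mods hsub
  have h2 := pvMask_bit "Shift" 2 (by decide) mods hsub
  have h3 := pvMask_bit "Alt" 4 (by decide) mods hsub
  have h4 := pvMask_bit "Win" 8 (by decide) mods hsub
  simp only [pvDecode, pvModTable, pvModifierOrder, List.filter, PySem.Set.contains_eq_listContains,
    List.contains_eq_mem, PySem.Set.mem_ofList, h1, h2, h3, h4]
  by_cases m1 : "Ctrl" ∈ mods <;> by_cases m2 : "Shift" ∈ mods <;> by_cases m3 : "Alt" ∈ mods <;>
    by_cases m4 : "Win" ∈ mods <;> simp [m1, m2, m3, m4]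

-- ===== VERDICT (by name: the statement is the Claim_ definition above) =====
theorem get_input_display_text_spec : Claim_equal_get_input_display_text := by
  intro click keys _
  show get_input_display_text click keys = get_input_display_text_alt click keys
  unfold get_input_display_text get_input_display_text_alt
  dsimp only
  by_cases hk : keys ≠ "" ∧ keys ≠ "None"
  · simp only [if_pos hk, pv_filter_map_strip, pvAStep_foldl, pvScan_eq, List.nil_append]
    set kl := (((PySem.Str.split? keys ",").getD []).map PySem.Str.strip).filter (fun k => k ≠ "") with hkl
    set mods := kl.filter (fun k => pvModifierOrder.contains k) with hmods
    set others := (kl.filter (fun k => !pvModifierOrder.contains k)).map pvNorm with ho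
    have hsub : ∀ x ∈ mods, x ∈ pvModifierOrder := by
      intro x hx
      rw [hmods, List.mem_filter] at hx
      simpa using hx.2
    rw [pv_sorted_eq_filter mods hsub, pvDecode_eq mods hsub]
    set mf := pvModifierOrder.filter (fun m => PySem.Set.contains (PySem.Set.ofList mods) m)
    set mouse := (if click ≠ "" ∧ click ≠ "None" then
      (if PySem.Str.isIn "L" click then ["左クリック"] else []) ++
      (if PySem.Str.isIn "R" click then ["右クリック"] else []) ++
      (if PySem.Str.isIn "M" click then ["中クリック"] else [])
    else []) with hm
    by_cases hz : mouse = [] ∧ others = []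
    · simp [hz.1, hz.2]
    · have hnon : mouse.length > 0 ∨ others.length > 0 := by
        rcases not_and_or.mp hz with h | h
        · exact Or.inl (List.length_pos_iff.mpr h)
        · exact Or.inr (List.length_pos_iff.mpr h)
      have hne : mf ++ mouse ++ others ≠ [] := by
        intro h
        simp only [List.append_eq_nil_iff] at h
        rcases hnon with h' | h'
        · rw [h.1.2] at h'; simp at h'
        · rw [h.2] at h'; simp at h'
      rw [if_pos ⟨hne, hnon⟩, if_neg hz]
  · simp only [if_neg hk]
    set mouse := (if click ≠ "" ∧ click ≠ "None" then
      (if PySem.Str.isIn "L" click then ["左クリック"] else []) ++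
      (if PySem.Str.isIn "R" click then ["右クリック"] else []) ++
      (if PySem.Str.isIn "M" click then ["中クリック"] else [])
    else []) with hm
    by_cases hz : mouse = []
    · simp [hz, PySem.List.sorted]
    · have hnon : mouse.length > 0 ∨ ([] : List String).length > 0 :=
        Or.inl (List.length_pos_iff.mpr hz)
      have hne : PySem.List.sorted (PySem.Set.ofList ([] : List String)) pvAKey ++ mouse ++ ([] : List String) ≠ [] := by
        simp [PySem.List.sorted, hz]
      rw [if_pos ⟨hne, hnon⟩, if_neg (by simp [hz])]
      simp [PySem.List.sorted, pvDecode, pvModTable]
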